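-- pv_equiv track=rewrite | github.com/kaikaichumi/OpenKuro | src/core/security/gateway_validation.py | _extract_target_url
-- ===== SOURCE A (Python) =====
-- from typing import Any
--
-- _TARGET_URL_KEYS = (
--     "url",
--     "target_url",
--     "endpoint",
--     "webhook_url",
--     "image_url",
--     "download_url",
--     "source_url",
--     "link",
-- )
--
-- def _extract_target_url(params: dict[str, Any]) -> str:
--     for key in _TARGET_URL_KEYS:
--         val = params.get(key)
--         if isinstance(val, str) and val.strip().startswith(("http://", "https://")):
--             return val.strip()
--
--     for key, value in params.items():
--         if "url" not in str(key or "").lower():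
--             continue
--         if isinstance(value, str) and value.strip().startswith(("http://", "https://")):
--             return value.strip()
--
--     return ""
-- ===== SOURCE B (Python) =====
-- _TARGET_URL_KEYS = (
--     "url",
--     "target_url",
--     "endpoint",
--     "webhook_url",
--     "image_url",
--     "download_url",
--     "source_url",
--     "link",
-- )
--
-- def _extract_target_url(params):
--     # Single pass over the items: pick the match with the smallest rank
--     # (rank = position in the priority tuple, else len(tuple) for url-named keys).
--     best_rank = None
--     best_val = ""
--     for key, value in params.items():
--         if not (isinstance(value, str)
--                 and value.strip().startswith(("http://", "https://"))):
--             continue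
--         if key in _TARGET_URL_KEYS:
--             rank = _TARGET_URL_KEYS.index(key)
--         elif "url" in str(key or "").lower():
--             rank = len(_TARGET_URL_KEYS)
--         else:
--             continue
--         if best_rank is None or rank < best_rank:
--             best_rank = rank
--             best_val = value.strip()
--     return best_val
-- ===== Notes on version B (the rewrite author's own statement) =====
-- stated objective: alternative
-- what changed: B replaces A's staged search (probe the 8 priority keys via dict.get, then a second scan of items()) by a single pass over params.items() that selects the match of smallest rank, ranking each URL-valued item by its key's index in the priority tuple (8 for other url-named keys); Pre_ requires distinct keys, which every real Python dict satisfies.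
import Mathlib
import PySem

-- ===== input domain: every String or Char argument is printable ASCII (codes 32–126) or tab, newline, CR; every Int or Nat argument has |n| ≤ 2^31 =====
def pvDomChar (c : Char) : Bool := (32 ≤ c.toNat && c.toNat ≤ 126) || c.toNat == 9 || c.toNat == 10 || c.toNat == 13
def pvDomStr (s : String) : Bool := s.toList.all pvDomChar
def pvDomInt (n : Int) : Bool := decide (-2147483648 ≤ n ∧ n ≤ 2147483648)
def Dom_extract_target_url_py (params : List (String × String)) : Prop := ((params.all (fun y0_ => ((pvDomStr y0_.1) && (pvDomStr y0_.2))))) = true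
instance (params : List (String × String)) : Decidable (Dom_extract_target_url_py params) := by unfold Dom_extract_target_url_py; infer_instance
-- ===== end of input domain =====

-- B replaces A's staged search (priority-key probing, then an items() scan) by ONE pass
-- over the items selecting the minimum-rank match; objective: alternative algorithm.

-- shared predicate: v.strip().startswith(("http://", "https://"))
def pvOk (v : String) : Bool :=
  PySem.Str.startswith (PySem.Str.strip v) "http://" ||
  PySem.Str.startswith (PySem.Str.strip v) "https://"

def pvTargetUrlKeys : List String :=
  ["url", "target_url", "endpoint", "webhook_url", "image_url",
   "download_url", "source_url", "link"]

-- "url" in str(key or "").lower()  (on a String key, `key or ""` is key itself up to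
-- emptiness, and "url" is never in ""; str() is the identity on str)
def pvUrlKey (k : String) : Bool := PySem.Str.isIn "url" (PySem.Str.lower k)

-- ===== PORT A =====
-- first loop of A: probe the priority keys via params.get
def pvLoopA1 : List String → List (String × String) → Option String
  | [], _ => none
  | k :: ks, params =>
    match (PySem.Dict.mk params).get? k with
    | some v => if pvOk v then some (PySem.Str.strip v) else pvLoopA1 ks params
    | none => pvLoopA1 ks params

-- second loop of A: scan params.items()
def pvLoopA2 : List (String × String) → Option String
  | [] => none
  | (k, v) :: rest =>
    if !pvUrlKey k then pvLoopA2 rest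
    else if pvOk v then some (PySem.Str.strip v) else pvLoopA2 rest

def extract_target_url_py (params : List (String × String)) : String :=
  match pvLoopA1 pvTargetUrlKeys params with
  | some s => s
  | none =>
    match pvLoopA2 params with
    | some s => s
    | none => ""

-- ===== PORT B =====
-- `if best_rank is None or rank < best_rank: best_rank, best_val = rank, v.strip()`
def pvTake (st : Option Nat × String) (r : Nat) (s : String) : Option Nat × String :=
  match st.1 with
  | none => (some r, s)
  | some br => if r < br then (some r, s) else st

-- one iteration of B's loop body
def pvStepB (st : Option Nat × String) (kv : String × String) : Option Nat × String :=
  if pvOk kv.2 then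
    match PySem.List.index? pvTargetUrlKeys kv.1 with
    | some r => pvTake st r (PySem.Str.strip kv.2)
    | none =>
      if pvUrlKey kv.1 then pvTake st pvTargetUrlKeys.length (PySem.Str.strip kv.2)
      else st
  else st

def extract_target_url_py_alt (params : List (String × String)) : String :=
  (params.foldl pvStepB (none, "")).2

-- ===== PRECONDITION & SPEC =====
-- Pre_ requires the association list to have pairwise-distinct keys: a Python dict can
-- never contain a duplicate key, so this excludes only assoc lists that correspond to
-- no Python input (on duplicates, first-match get? and an items scan can disagree).
def Pre_extract_target_url_py (params : List (String × String)) : Prop :=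
  (params.map Prod.fst).Nodup
instance (params : List (String × String)) : Decidable (Pre_extract_target_url_py params) := by
  unfold Pre_extract_target_url_py; infer_instance

def pvWitness_extract_target_url_py : (List (String × String)) :=
  [("name", "job"), ("myurl", "  https://e.com/x ")]

def Spec_extract_target_url_py (params : List (String × String)) (out : String) : Prop := out = extract_target_url_py_alt params
instance (params : List (String × String)) (out : String) : Decidable (Spec_extract_target_url_py params out) := by unfold Spec_extract_target_url_py; infer_instance

-- ===== CLAIM (what is proved, stated in full; the proofs are below) =====
def Claim_equal_extract_target_url_py : Prop := ∀ (params : List (String × String)), Dom_extract_target_url_py params → Pre_extract_target_url_py params → Spec_extract_target_url_py params (extract_target_url_py params)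

-- ===== LEMMAS AND PROOFS =====
set_option maxHeartbeats 1000000

-- the rank B assigns to a key, as one function (proof-side view of pvStepB's branching)
def pvRank? (k : String) : Option Nat :=
  match PySem.List.index? pvTargetUrlKeys k with
  | some r => some r
  | none => if pvUrlKey k then some 8 else none

theorem pvLoopA1_none (ks : List String) (p : List (String × String))
    (h : pvLoopA1 ks p = none) :
    ∀ k ∈ ks, ∀ v, (PySem.Dict.mk p).get? k = some v → pvOk v = false := by
  induction ks with
  | nil => intro k hk; cases hk
  | cons k0 ks ih =>
    intro k hk v hv
    unfold pvLoopA1 at h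
    rcases List.mem_cons.mp hk with rfl | hk'
    · rw [hv] at h
      by_cases hok : pvOk v
      · simp [hok] at h
      · exact Bool.eq_false_iff.mpr hok
    · cases hget : (PySem.Dict.mk p).get? k0 with
      | none => rw [hget] at h; exact ih h k hk' v hv
      | some v0 =>
        rw [hget] at h
        by_cases hok : pvOk v0
        · simp [hok] at h
        · simp only [hok, Bool.false_eq_true, if_false] at h
          exact ih h k hk' v hv

theorem pvLoopA1_some (ks : List String) (p : List (String × String)) (s : String)
    (h : pvLoopA1 ks p = some s) :
    ∃ i, ∃ hi : i < ks.length, ∃ v, (PySem.Dict.mk p).get? ks[i] = some v ∧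
      pvOk v = true ∧ s = PySem.Str.strip v ∧
      ∀ j, ∀ hj : j < ks.length, j < i → ∀ v', (PySem.Dict.mk p).get? ks[j] = some v' →
        pvOk v' = false := by
  induction ks with
  | nil => cases h
  | cons k0 ks ih =>
    unfold pvLoopA1 at h
    cases hget : (PySem.Dict.mk p).get? k0 with
    | some v0 =>
      rw [hget] at h
      by_cases hok : pvOk v0
      · simp only [hok, if_true, Option.some.injEq] at h
        refine ⟨0, by simp, v0, hget, hok, h.symm, ?_⟩
        intro j hj hji; omega
      · simp only [hok, Bool.false_eq_true, if_false] at h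
        obtain ⟨i, hi, v, hg, hokv, hs, hmin⟩ := ih h
        refine ⟨i + 1, by simpa using Nat.succ_lt_succ hi, v, by simpa using hg, hokv, hs, ?_⟩
        intro j hj hji v' hv'
        cases j with
        | zero =>
          simp only [List.getElem_cons_zero] at hv'
          rw [hget] at hv'
          injection hv' with e
          subst e
          exact Bool.eq_false_iff.mpr hok
        | succ j' =>
          simp only [List.getElem_cons_succ] at hv'
          exact hmin j' (by omega) (by omega) v' hv'
    | none =>
      rw [hget] at h
      obtain ⟨i, hi, v, hg, hokv, hs, hmin⟩ := ih h
      refine ⟨i + 1, by simpa using Nat.succ_lt_succ hi, v, by simpa using hg, hokv, hs, ?_⟩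
      intro j hj hji v' hv'
      cases j with
      | zero =>
        simp only [List.getElem_cons_zero] at hv'
        rw [hget] at hv'
        cases hv'
      | succ j' =>
        simp only [List.getElem_cons_succ] at hv'
        exact hmin j' (by omega) (by omega) v' hv'

theorem pvGet_mem (p : List (String × String)) (hnd : (p.map Prod.fst).Nodup)
    (k : String) (v : String) :
    (PySem.Dict.mk p).get? k = some v ↔ (k, v) ∈ p := by
  induction p with
  | nil => simp [PySem.Dict.get?]
  | cons kv rest ih =>
    obtain ⟨k0, v0⟩ := kv
    simp only [List.map_cons, List.nodup_cons] at hnd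
    obtain ⟨hk0, hrest⟩ := hnd
    rw [PySem.Dict.get?_mk_cons]
    by_cases he : k0 = k
    · subst he
      simp only [beq_self_eq_true, if_true, Option.some.injEq, List.mem_cons]
      constructor
      · intro e; exact Or.inl (by rw [e])
      · rintro (e | hm)
        · cases e; rfl
        · exact absurd (List.mem_map.mpr ⟨(k0, v), hm, rfl⟩) hk0
    · rw [if_neg (by simpa using he)]
      rw [ih hrest]
      simp only [List.mem_cons, Prod.mk.injEq]
      constructor
      · exact Or.inr
      · rintro (⟨e, _⟩ | hm)
        · exact absurd e.symm he
        · exact hm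

theorem pvStepB_eq (st : Option Nat × String) (k : String) (v : String) :
    pvStepB st (k, v) =
      if pvOk v then
        match pvRank? k with
        | some r => pvTake st r (PySem.Str.strip v)
        | none => st
      else st := by
  unfold pvStepB pvRank?
  cases PySem.List.index? pvTargetUrlKeys k with
  | none => by_cases h : pvUrlKey k <;> simp [h, pvTargetUrlKeys]
  | some r => rfl

theorem pvFold_some (p : List (String × String)) :
    ∀ br bs, p.foldl pvStepB (some br, bs) =
      match p.foldl pvStepB ((none : Option Nat), "") with
      | (some r, s) => if r < br then (some r, s) else (some br, bs)
      | (none, _) => (some br, bs) := by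
  induction p with
  | nil => intro br bs; rfl
  | cons kv rest ih =>
    intro br bs
    obtain ⟨k, v⟩ := kv
    simp only [List.foldl_cons, pvStepB_eq]
    by_cases hok : pvOk v
    · simp only [hok, if_true]
      cases hr : pvRank? k with
      | none => exact ih br bs
      | some r =>
        simp only [pvTake]
        by_cases hbr : r < br
        · rw [if_pos hbr, ih r]
          rcases hrest : rest.foldl pvStepB ((none : Option Nat), "") with ⟨o, s'⟩
          cases o with
          | none => simp [hbr]
          | some r' =>
            by_cases h1 : r' < r
            · simp [h1, (by omega : r' < br)]
            · simp [h1, hbr]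
        · rw [if_neg hbr, ih br, ih r]
          rcases hrest : rest.foldl pvStepB ((none : Option Nat), "") with ⟨o, s'⟩
          cases o with
          | none => simp [hbr]
          | some r' =>
            by_cases h1 : r' < r
            · simp [h1]
            · have h2 : ¬ r' < br := by omega
              simp [h1, h2, hbr]
    · simp only [hok, Bool.false_eq_true, if_false]
      exact ih br bs

theorem pvFold_keep8 (p : List (String × String))
    (h : ∀ kv ∈ p, pvOk kv.2 = true → PySem.List.index? pvTargetUrlKeys kv.1 = none) :
    ∀ s, p.foldl pvStepB (some 8, s) = (some 8, s) := by
  induction p with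
  | nil => intro s; rfl
  | cons kv rest ih =>
    intro s
    obtain ⟨k, v⟩ := kv
    simp only [List.foldl_cons, pvStepB_eq]
    have ih' := ih (fun kv hm => h kv (List.mem_cons_of_mem _ hm))
    by_cases hok : pvOk v
    · have hidx := h (k, v) List.mem_cons_self hok
      simp only [hok, if_true]
      unfold pvRank?
      rw [hidx]
      by_cases hu : pvUrlKey k
      · simp only [hu, if_true, pvTake]
        simp only [show ¬ (8 < 8) by omega, if_false]
        exact ih' s
      · simp only [hu, Bool.false_eq_true, if_false]
        exact ih' s
    · simp only [hok, Bool.false_eq_true, if_false]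
      exact ih' s

theorem pvFold_loopA2 (p : List (String × String))
    (h : ∀ kv ∈ p, pvOk kv.2 = true → PySem.List.index? pvTargetUrlKeys kv.1 = none) :
    (p.foldl pvStepB ((none : Option Nat), "")).2 = (pvLoopA2 p).getD "" := by
  induction p with
  | nil => rfl
  | cons kv rest ih =>
    obtain ⟨k, v⟩ := kv
    have h' : ∀ kv ∈ rest, pvOk kv.2 = true → PySem.List.index? pvTargetUrlKeys kv.1 = none :=
      fun kv hm => h kv (List.mem_cons_of_mem _ hm)
    simp only [List.foldl_cons, pvStepB_eq]
    unfold pvLoopA2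
    by_cases hok : pvOk v
    · have hidx := h (k, v) List.mem_cons_self hok
      simp only [hok, if_true]
      unfold pvRank?
      rw [hidx]
      by_cases hu : pvUrlKey k
      · simp only [hu, if_true, Bool.not_true, Bool.false_eq_true, if_false, pvTake]
        rw [pvFold_keep8 rest h']
        rfl
      · simp only [hu, Bool.not_false, if_true, Bool.false_eq_true, if_false]
        exact ih h'
    · simp only [hok, Bool.false_eq_true, if_false]
      by_cases hu : pvUrlKey k
      · simp only [hu, Bool.not_true, Bool.false_eq_true, if_false]
        exact ih h'
      · simp only [hu, Bool.not_false, if_true]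
        exact ih h'

-- the fold's result, when set, is the rank and stripped value of some item of p

theorem pvFold_res (p : List (String × String)) (r : Nat) (s : String)
    (h : p.foldl pvStepB ((none : Option Nat), "") = (some r, s)) :
    ∃ kv ∈ p, pvOk kv.2 = true ∧ pvRank? kv.1 = some r ∧ PySem.Str.strip kv.2 = s := by
  induction p generalizing r s with
  | nil => cases h
  | cons kv rest ih =>
    obtain ⟨k, v⟩ := kv
    simp only [List.foldl_cons, pvStepB_eq] at h
    by_cases hok : pvOk v
    · simp only [hok, if_true] at h
      cases hr : pvRank? k with
      | none =>
        rw [hr] at h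
        obtain ⟨kv', hm, h1, h2, h3⟩ := ih _ _ h
        exact ⟨kv', List.mem_cons_of_mem _ hm, h1, h2, h3⟩
      | some r0 =>
        rw [hr] at h
        simp only [pvTake] at h
        rw [pvFold_some rest r0 (PySem.Str.strip v)] at h
        rcases hrest : rest.foldl pvStepB ((none : Option Nat), "") with ⟨o, s'⟩
        rw [hrest] at h
        cases o with
        | none =>
          simp only at h
          obtain ⟨e1, e2⟩ := Prod.mk.injEq .. ▸ h
          injection e1 with e1
          exact ⟨(k, v), List.mem_cons_self, hok, by rw [hr, e1], e2⟩
        | some r' =>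
          simp only at h
          by_cases h1 : r' < r0
          · rw [if_pos h1] at h
            obtain ⟨kv', hm, a1, a2, a3⟩ := ih _ _ hrest
            injection h with e1 e2
            injection e1 with e1
            exact ⟨kv', List.mem_cons_of_mem _ hm, a1, by rw [a2, e1], by rw [a3, e2]⟩
          · rw [if_neg h1] at h
            injection h with e1 e2
            injection e1 with e1
            exact ⟨(k, v), List.mem_cons_self, hok, by rw [hr, e1], e2⟩
    · simp only [hok, Bool.false_eq_true, if_false] at h
      obtain ⟨kv', hm, h1, h2, h3⟩ := ih _ _ h
      exact ⟨kv', List.mem_cons_of_mem _ hm, h1, h2, h3⟩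

theorem pvFold_min (p : List (String × String)) (rm : Nat) (sm : String)
    (hex : ∃ kv ∈ p, pvOk kv.2 = true ∧ pvRank? kv.1 = some rm ∧ PySem.Str.strip kv.2 = sm)
    (hmin : ∀ kv ∈ p, pvOk kv.2 = true → ∀ r, pvRank? kv.1 = some r →
        rm ≤ r ∧ (r = rm → PySem.Str.strip kv.2 = sm)) :
    p.foldl pvStepB ((none : Option Nat), "") = (some rm, sm) := by
  induction p with
  | nil => obtain ⟨kv, hm, -⟩ := hex; cases hm
  | cons kv rest ih =>
    obtain ⟨k, v⟩ := kv
    have hmin' : ∀ kv ∈ rest, pvOk kv.2 = true → ∀ r, pvRank? kv.1 = some r →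
        rm ≤ r ∧ (r = rm → PySem.Str.strip kv.2 = sm) :=
      fun kv hm => hmin kv (List.mem_cons_of_mem _ hm)
    simp only [List.foldl_cons, pvStepB_eq]
    by_cases hok : pvOk v
    · simp only [hok, if_true]
      cases hr : pvRank? k with
      | none =>
        -- head not a match: witness is in the tail
        obtain ⟨kv', hm, a1, a2, a3⟩ := hex
        rcases List.mem_cons.mp hm with e | hm'
        · rw [e] at a2; rw [a2] at hr; cases hr
        · exact ih ⟨kv', hm', a1, a2, a3⟩ hmin'
      | some r0 =>
        have hhead := hmin (k, v) List.mem_cons_self hok r0 hr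
        simp only [pvTake]
        by_cases he : r0 = rm
        · subst he
          rw [hhead.2 rfl]
          rw [pvFold_some rest r0 sm]
          rcases hrest : rest.foldl pvStepB ((none : Option Nat), "") with ⟨o, s'⟩
          cases o with
          | none => simp
          | some r' =>
            obtain ⟨kv', hm', a1, a2, a3⟩ := pvFold_res rest r' s' hrest
            have := (hmin' kv' hm' a1 r' a2).1
            simp only [show ¬ (r' < r0) by omega, if_false]
        · -- r0 > rm strictly: the witness is in the tail and wins
          obtain ⟨kv', hm, a1, a2, a3⟩ := hex
          rcases List.mem_cons.mp hm with e | hm'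
          · rw [e] at a2; rw [a2] at hr; injection hr with e'; omega
          · have hrest := ih ⟨kv', hm', a1, a2, a3⟩ hmin'
            rw [pvFold_some rest r0 (PySem.Str.strip v), hrest]
            simp [show rm < r0 by omega]
    · simp only [hok, Bool.false_eq_true, if_false]
      obtain ⟨kv', hm, a1, a2, a3⟩ := hex
      rcases List.mem_cons.mp hm with e | hm'
      · rw [e] at a1; rw [a1] at hok; cases hok rfl
      · exact ih ⟨kv', hm', a1, a2, a3⟩ hmin'

theorem pvIdx_pri (i : Nat) (hi : i < pvTargetUrlKeys.length) :
    PySem.List.index? pvTargetUrlKeys pvTargetUrlKeys[i] = some i := by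
  have h8 : i < 8 := by simpa [pvTargetUrlKeys] using hi
  interval_cases i <;> rfl

theorem pvMain (params : List (String × String)) (hpre : (params.map Prod.fst).Nodup) :
    (match pvLoopA1 pvTargetUrlKeys params with
     | some s => s
     | none => match pvLoopA2 params with | some s => s | none => "") =
    (params.foldl pvStepB ((none : Option Nat), "")).2 := by
  cases h1 : pvLoopA1 pvTargetUrlKeys params with
  | none =>
    have hH : ∀ kv ∈ params, pvOk kv.2 = true → PySem.List.index? pvTargetUrlKeys kv.1 = none := by
      rintro ⟨k, v⟩ hm hok
      cases hidx : PySem.List.index? pvTargetUrlKeys k with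
      | none => rfl
      | some r =>
        obtain ⟨hr, he, -⟩ := PySem.List.getElem_of_index?_eq_some hidx
        have hget : (PySem.Dict.mk params).get? k = some v := (pvGet_mem params hpre k v).mpr hm
        have hbad := pvLoopA1_none _ _ h1 k (he ▸ List.getElem_mem hr) v hget
        rw [hok] at hbad; cases hbad
    rw [pvFold_loopA2 params hH]
    cases pvLoopA2 params <;> rfl
  | some s =>
    obtain ⟨i, hi, v, hget, hok, hs, hminA⟩ := pvLoopA1_some _ _ _ h1
    have hmem := (pvGet_mem params hpre _ v).mp hget
    have hlen : i < 8 := by simpa [pvTargetUrlKeys] using hi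
    have hex : ∃ kv ∈ params, pvOk kv.2 = true ∧ pvRank? kv.1 = some i ∧ PySem.Str.strip kv.2 = PySem.Str.strip v :=
      ⟨(pvTargetUrlKeys[i], v), hmem, hok, by show pvRank? pvTargetUrlKeys[i] = some i; unfold pvRank?; rw [pvIdx_pri], rfl⟩
    have hmin : ∀ kv ∈ params, pvOk kv.2 = true → ∀ r, pvRank? kv.1 = some r →
        i ≤ r ∧ (r = i → PySem.Str.strip kv.2 = PySem.Str.strip v) := by
      rintro ⟨k, v'⟩ hm hok' r hr
      unfold pvRank? at hr
      cases hidx : PySem.List.index? pvTargetUrlKeys k with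
      | none =>
        rw [hidx] at hr
        by_cases hu : pvUrlKey k
        · simp only [hu, if_true, Option.some.injEq] at hr
          subst hr
          exact ⟨by omega, fun e => absurd e (by omega)⟩
        · simp [hu] at hr
      | some r0 =>
        rw [hidx] at hr
        injection hr with e; subst e
        obtain ⟨hr0len, he, -⟩ := PySem.List.getElem_of_index?_eq_some hidx
        have hget' : (PySem.Dict.mk params).get? k = some v' := (pvGet_mem params hpre k v').mpr hm
        constructor
        · by_contra hlt
          have hbad := hminA r0 hr0len (by omega) v' (by rw [he]; exact hget')
          rw [hok'] at hbad; cases hbad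
        · intro e; subst e
          rw [← he] at hget'
          rw [hget] at hget'
          injection hget' with e'
          rw [← e']
    rw [pvFold_min params i (PySem.Str.strip v) hex hmin]
    simpa using hs

-- ===== VERDICT (by name: the statement is the Claim_ definition above) =====
theorem extract_target_url_py_spec : Claim_equal_extract_target_url_py := by
  intro params _hdom hpre
  unfold Spec_extract_target_url_py extract_target_url_py extract_target_url_py_alt
  exact pvMain params hpre
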